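-- pv_equiv track=rewrite | github.com/fiddlerpianist/advent-of-code | 2019/day04.py | determineIfCriteriaMetPartTwo
-- ===== SOURCE A (Python) =====
-- def determineIfCriteriaMetPartTwo(num):
--     digits = [int(x) for x in str(num)]
--     #print (digits)
--     if len(digits) != 6:
--         return False
--
--     repeatedDigitCount = 1
--     foundDoubleDigit = False
--     previousDigit = -1
--     for i in digits:
--         if i < previousDigit:
--             return False
--         elif i == previousDigit:
--             repeatedDigitCount += 1
--         elif i > previousDigit:
--             # we found an exact sequence of 2. Mark it, then reset
--             if repeatedDigitCount == 2:
--                 foundDoubleDigit = True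
--             repeatedDigitCount = 1
--         previousDigit = i
--
--     # In case the double digit is at the end
--     if repeatedDigitCount == 2:
--         foundDoubleDigit = True
--
--     return foundDoubleDigit
-- ===== SOURCE B (Python) =====
-- def determineIfCriteriaMetPartTwo(num):
--     digits = [int(x) for x in str(num)]
--     if len(digits) != 6:
--         return False
--     if digits != sorted(digits):
--         return False
--     return any(digits.count(d) == 2 for d in set(digits))
-- ===== Notes on version B (the rewrite author's own statement) =====
-- stated objective: idiomatic
-- what changed: Replaces A's single fused state-machine loop (previous digit, run counter, found flag) with two separate declarative passes: a non-decreasing check via digits != sorted(digits) and an exact-double check via any(digits.count(d) == 2 for d in set(digits)).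
import Mathlib
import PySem

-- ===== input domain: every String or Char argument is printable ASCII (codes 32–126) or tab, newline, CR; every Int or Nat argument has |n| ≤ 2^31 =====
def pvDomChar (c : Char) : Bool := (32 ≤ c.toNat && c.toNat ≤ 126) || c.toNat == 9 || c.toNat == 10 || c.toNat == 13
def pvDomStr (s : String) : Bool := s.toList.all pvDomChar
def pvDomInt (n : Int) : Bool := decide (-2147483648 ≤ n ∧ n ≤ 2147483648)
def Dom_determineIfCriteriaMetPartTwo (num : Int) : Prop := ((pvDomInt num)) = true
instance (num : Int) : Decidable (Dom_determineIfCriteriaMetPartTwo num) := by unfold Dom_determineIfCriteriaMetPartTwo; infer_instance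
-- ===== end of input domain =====

-- B replaces A's fused state-machine loop by two declarative passes (a sorted-equality check plus a per-distinct-digit count check); same return value on every num ≥ 0 (both raise ValueError on negative num, excluded by Pre_).


-- shared preamble of both Pythons: digits = [int(x) for x in str(num)].
-- Exact for num ≥ 0 (Pre_): str(num) is then all digit chars, and int(x) on a digit char is its code minus 48;
-- for num < 0 Python raises ValueError at int('-') in BOTH programs (excluded by Pre_).
def pvStrDigits (num : Int) : List Int :=
  (PySem.Int.toChars num).map (fun x => ((x.toNat : Int) - 48))

-- ===== PORT A =====
-- the fused loop: for i in digits: … with state (repeatedDigitCount, foundDoubleDigit, previousDigit), early return False on a descent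
def pvLoopA : List Int → Int → Bool → Int → Bool
  | [], repeatedDigitCount, foundDoubleDigit, _ =>
      -- trailing code: if repeatedDigitCount == 2: foundDoubleDigit = True; return foundDoubleDigit
      if repeatedDigitCount == 2 then true else foundDoubleDigit
  | i :: rest, repeatedDigitCount, foundDoubleDigit, previousDigit =>
      if i < previousDigit then false
      else if i == previousDigit then
        pvLoopA rest (repeatedDigitCount + 1) foundDoubleDigit i
      else
        pvLoopA rest 1 (if repeatedDigitCount == 2 then true else foundDoubleDigit) i

def determineIfCriteriaMetPartTwo (num : Int) : Bool :=
  let digits := pvStrDigits num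
  if digits.length ≠ 6 then false
  else pvLoopA digits 1 false (-1)

-- ===== PORT B =====
def determineIfCriteriaMetPartTwo_alt (num : Int) : Bool :=
  let digits := pvStrDigits num
  if digits.length ≠ 6 then false
  else if digits ≠ PySem.List.sorted digits (fun x => x) then false
  else (PySem.Set.ofList digits).any (fun d => PySem.List.count digits d == 2)

-- ===== PRECONDITION & SPEC =====
-- Pre_ excludes exactly num < 0, where Python A raises ValueError (int('-')); B raises there too.
def Pre_determineIfCriteriaMetPartTwo (num : Int) : Prop := 0 ≤ num
instance (num : Int) : Decidable (Pre_determineIfCriteriaMetPartTwo num) := by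
  unfold Pre_determineIfCriteriaMetPartTwo; infer_instance

def pvWitness_determineIfCriteriaMetPartTwo : Int := 112233

def Spec_determineIfCriteriaMetPartTwo (num : Int) (out : Bool) : Prop :=
  out = determineIfCriteriaMetPartTwo_alt num
instance (num : Int) (out : Bool) : Decidable (Spec_determineIfCriteriaMetPartTwo num out) := by
  unfold Spec_determineIfCriteriaMetPartTwo; infer_instance

-- ===== CLAIM (what is proved, stated in full; the proofs are below) =====
def Claim_equal_determineIfCriteriaMetPartTwo : Prop :=
  ∀ (num : Int), Dom_determineIfCriteriaMetPartTwo num →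
    Pre_determineIfCriteriaMetPartTwo num →
    Spec_determineIfCriteriaMetPartTwo num (determineIfCriteriaMetPartTwo num)

-- ===== LEMMAS AND PROOFS =====

-- the run structure of A's loop, with the found-flag factored out
def pvRuns : List Int → Int → Int → Bool
  | [], _, rc => rc == 2
  | i :: rest, prev, rc =>
      if i == prev then pvRuns rest prev (rc + 1)
      else ((rc == 2) || pvRuns rest i 1)

theorem pvDigitChar_ge (n : Nat) (h : n < 10) : 48 ≤ (Nat.digitChar n).toNat := by
  interval_cases n <;> decide

theorem pvToDigitsCore_mem (f : Nat) : ∀ (n : Nat) (l : List Char),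
    ∀ c ∈ Nat.toDigitsCore 10 f n l, c ∈ l ∨ 48 ≤ c.toNat := by
  induction f with
  | zero => intro n l c hc; exact Or.inl hc
  | succ f ih =>
    intro n l c hc
    simp only [Nat.toDigitsCore] at hc
    have hd : 48 ≤ (Nat.digitChar (n % 10)).toNat :=
      pvDigitChar_ge _ (Nat.mod_lt _ (by decide))
    by_cases h0 : n / 10 = 0
    · simp only [h0] at hc
      rcases List.mem_cons.mp hc with h1 | h1
      · exact Or.inr (h1 ▸ hd)
      · exact Or.inl h1
    · rw [if_neg h0] at hc
      rcases ih (n / 10) (Nat.digitChar (n % 10) :: l) c hc with h1 | h1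
      · rcases List.mem_cons.mp h1 with h2 | h2
        · exact Or.inr (h2 ▸ hd)
        · exact Or.inl h2
      · exact Or.inr h1

theorem pvStrDigits_nonneg (num : Int) (h : 0 ≤ num) :
    ∀ d ∈ pvStrDigits num, 0 ≤ d := by
  intro d hd
  simp only [pvStrDigits, List.mem_map] at hd
  obtain ⟨c, hc, rfl⟩ := hd
  have : c ∈ Nat.toDigits 10 num.toNat := by
    simpa [PySem.Int.toChars, Int.not_lt.mpr h] using hc
  rcases pvToDigitsCore_mem _ _ _ c this with h48 | h48
  · simp at h48
  · omega

theorem pvLoopA_not_pairwise : ∀ (l : List Int) (prev rc : Int) (fd : Bool),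
    ¬ (prev :: l).Pairwise (· ≤ ·) → pvLoopA l rc fd prev = false := by
  intro l
  induction l with
  | nil => intro prev rc fd h; exact absurd (by simp) h
  | cons i rest ih =>
    intro prev rc fd h
    by_cases hlt : i < prev
    · simp [pvLoopA, hlt]
    · have hle : prev ≤ i := not_lt.mp hlt
      have hnp : ¬ (i :: rest).Pairwise (· ≤ ·) := by
        intro hp
        exact h (List.pairwise_cons_cons_iff_of_trans.mpr ⟨hle, hp⟩)
      by_cases heq : i = prev
      · simp only [pvLoopA, if_neg hlt, beq_iff_eq, if_pos heq]
        exact ih i (rc + 1) fd hnp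
      · simp only [pvLoopA, if_neg hlt, beq_iff_eq, if_neg heq]
        exact ih i 1 _ hnp

theorem pvLoopA_pairwise : ∀ (l : List Int) (prev rc : Int) (fd : Bool),
    (prev :: l).Pairwise (· ≤ ·) → pvLoopA l rc fd prev = (fd || pvRuns l prev rc) := by
  intro l
  induction l with
  | nil =>
    intro prev rc fd h
    simp only [pvLoopA, pvRuns]
    by_cases hrc : rc = 2 <;> cases fd <;> simp [hrc]
  | cons i rest ih =>
    intro prev rc fd h
    obtain ⟨hle, hp⟩ := List.pairwise_cons_cons_iff_of_trans.mp h
    have hlt : ¬ i < prev := not_lt.mpr hle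
    by_cases heq : i = prev
    · simp only [pvLoopA, pvRuns, if_neg hlt, beq_iff_eq, if_pos heq]
      subst heq
      exact ih i (rc + 1) fd hp
    · simp only [pvLoopA, pvRuns, if_neg hlt, beq_iff_eq, if_neg heq]
      rw [ih i 1 _ hp]
      by_cases hrc : rc = 2 <;> cases fd <;> simp [hrc]

theorem pvRuns_spec : ∀ (l : List Int) (i rc : Int),
    (i :: l).Pairwise (· ≤ ·) →
    pvRuns l i rc
      = ((rc + (l.count i : Int) == 2) || decide (∃ d ∈ l, i < d ∧ l.count d = 2)) := by
  intro l
  induction l with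
  | nil => intro i rc h; simp [pvRuns]
  | cons j t ih =>
    intro i rc h
    obtain ⟨hij, hp⟩ := List.pairwise_cons_cons_iff_of_trans.mp h
    by_cases hji : j = i
    · subst hji
      rw [show pvRuns (j :: t) j rc = pvRuns t j (rc + 1) from by simp [pvRuns]]
      rw [ih j (rc + 1) hp]
      congr 1
      · rw [Bool.eq_iff_iff]
        simp only [beq_iff_eq, List.count_cons_self]
        push_cast
        constructor <;> intro <;> omega
      · rw [decide_eq_decide]
        constructor
        · rintro ⟨d, hd, hlt, hc⟩
          refine ⟨d, List.mem_cons_of_mem _ hd, hlt, ?_⟩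
          rwa [List.count_cons_of_ne (ne_of_lt hlt)]
        · rintro ⟨d, hd, hlt, hc⟩
          rcases List.mem_cons.mp hd with rfl | hd
          · exact absurd hlt (lt_irrefl _)
          · exact ⟨d, hd, hlt, by rwa [List.count_cons_of_ne (ne_of_lt hlt)] at hc⟩
    · have hij' : i < j := lt_of_le_of_ne hij (fun e => hji e.symm)
      have hjt : ∀ x ∈ t, j ≤ x := fun x hx => (List.pairwise_cons.mp hp).1 x hx
      have hint : i ∉ j :: t := by
        intro hm
        rcases List.mem_cons.mp hm with rfl | hm
        · exact absurd hij' (lt_irrefl i)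
        · exact absurd (lt_of_lt_of_le hij' (hjt i hm)) (lt_irrefl i)
      rw [show pvRuns (j :: t) i rc = ((rc == 2) || pvRuns t j 1) from by
        simp [pvRuns, hji]]
      rw [ih j 1 hp]
      rw [show ((j :: t).count i : Int) = 0 from by simp [List.count_eq_zero.mpr hint]]
      rw [add_zero]
      have key : ((1 + (t.count j : Int) == 2) || decide (∃ d ∈ t, j < d ∧ t.count d = 2))
          = decide (∃ d ∈ j :: t, i < d ∧ (j :: t).count d = 2) := by
        have h1 : ((1 : Int) + (t.count j : Int) == 2) = decide (t.count j = 1) := by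
          rw [Bool.eq_iff_iff]; simp only [beq_iff_eq, decide_eq_true_eq]
          constructor <;> intro <;> omega
        rw [h1, ← Bool.decide_or, decide_eq_decide]
        constructor
        · rintro (hc | ⟨d, hd, hlt, hc⟩)
          · exact ⟨j, List.mem_cons_self, hij', by simp [List.count_cons_self, hc]⟩
          · refine ⟨d, List.mem_cons_of_mem _ hd, lt_trans hij' hlt, ?_⟩
            rwa [List.count_cons_of_ne (ne_of_lt hlt)]
        · rintro ⟨d, hd, hlt, hc⟩
          by_cases hdj : d = j
          · subst hdj
            left
            rw [List.count_cons_self] at hc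
            omega
          · right
            have hd' : d ∈ t := by
              rcases List.mem_cons.mp hd with rfl | hd
              · exact absurd rfl hdj
              · exact hd
            have hjd : j < d := lt_of_le_of_ne (hjt d hd') (fun e => hdj e.symm)
            exact ⟨d, hd', hjd, by rwa [List.count_cons_of_ne (ne_of_lt hjd)] at hc⟩
      rw [key]

theorem pvRuns_top (l : List Int) (prev : Int) (hp : l.Pairwise (· ≤ ·))
    (hlt : ∀ d ∈ l, prev < d) :
    pvRuns l prev 1 = decide (∃ d ∈ l, l.count d = 2) := by
  have hp' : (prev :: l).Pairwise (· ≤ ·) :=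
    List.pairwise_cons.mpr ⟨fun x hx => le_of_lt (hlt x hx), hp⟩
  rw [pvRuns_spec l prev 1 hp']
  have h0 : ((l.count prev : Int)) = 0 := by
    simp [List.count_eq_zero.mpr (fun hm => absurd (hlt prev hm) (lt_irrefl prev))]
  rw [h0, add_zero]
  have h1 : ((1 : Int) == 2) = false := by decide
  rw [h1, Bool.false_or, decide_eq_decide]
  constructor
  · rintro ⟨d, hd, _, hc⟩; exact ⟨d, hd, hc⟩
  · rintro ⟨d, hd, hc⟩; exact ⟨d, hd, hlt d hd, hc⟩

theorem pvAny_count (l : List Int) :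
    ((PySem.Set.ofList l).any (fun d => PySem.List.count l d == 2))
      = decide (∃ d ∈ l, l.count d = 2) := by
  rw [Bool.eq_iff_iff, List.any_eq_true]
  simp only [PySem.List.count_eq, beq_iff_eq, decide_eq_true_eq]
  constructor
  · rintro ⟨d, hd, hc⟩; exact ⟨d, (PySem.Set.mem_ofList l d).mp hd, hc⟩
  · rintro ⟨d, hd, hc⟩; exact ⟨d, (PySem.Set.mem_ofList l d).mpr hd, hc⟩

-- ===== VERDICT (by name: the statement is the Claim_ definition above) =====
theorem determineIfCriteriaMetPartTwo_spec : Claim_equal_determineIfCriteriaMetPartTwo := by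
  intro num _ hnum
  unfold Spec_determineIfCriteriaMetPartTwo
  unfold determineIfCriteriaMetPartTwo determineIfCriteriaMetPartTwo_alt
  set digits := pvStrDigits num with hdig
  by_cases hlen : digits.length ≠ 6
  · simp [hlen]
  · simp only [hlen, if_false]
    have hpos := pvStrDigits_nonneg num hnum
    by_cases hpw : digits.Pairwise (· ≤ ·)
    · have hs : PySem.List.sorted digits (fun x => x) = digits :=
        PySem.List.sorted_eq_self_of_pairwise digits (fun x => x) hpw
      rw [if_neg (by simp [hs])]
      have hltall : ∀ d ∈ digits, (-1 : Int) < d := fun d hd =>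
        lt_of_lt_of_le (by norm_num) (hpos d hd)
      have hpw' : ((-1 : Int) :: digits).Pairwise (· ≤ ·) :=
        List.pairwise_cons.mpr ⟨fun x hx => le_of_lt (hltall x hx), hpw⟩
      rw [pvLoopA_pairwise digits (-1) 1 false hpw', Bool.false_or,
        pvRuns_top digits (-1) hpw hltall, pvAny_count]
    · have hneq : digits ≠ PySem.List.sorted digits (fun x => x) := by
        intro he
        exact hpw (by rw [he]; exact PySem.List.sorted_pairwise digits (fun x => x))
      rw [if_pos hneq]
      apply pvLoopA_not_pairwise
      intro hc
      exact hpw (List.Pairwise.of_cons hc)
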